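-- pv_equiv track=rewrite | github.com/Alanjul/Pythonwork | ColumnTraverse.py | column_traverse
-- ===== SOURCE A (Python) =====
-- from typing import List
--
-- def column_traverse(matrix:List[List[int]]):
--     #initializing the rows and cols
--     rows,cols = len(matrix),len(matrix[0])
--     directions = "up" #upward motions
--     row,col = rows-1,cols-1
--     next=[]
--     while(len(next)<rows * cols):
--         next.append(matrix[row][col])
--         if directions == "up":
--             #checking if the top row has been visited
--             if row -1 < 0 :
--                 directions = "down"
--                 col = col - 1 #move to the next column to go down
--             else:
--                 row -= 1 #move up in the current column
--         else:
--             if directions == "down":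
--                 if row + 1 == rows: #at bottom switch direction
--                     directions = "up"
--                     col = col - 1 #move to next column
--                 else:
--                     row = row + 1 #move down in the current column
--     return next
-- ===== SOURCE B (Python) =====
-- from typing import List
--
-- def column_traverse(matrix: List[List[int]]):
--     rows, cols = len(matrix), len(matrix[0])
--     result = []
--     for i in range(cols):
--         c = cols - 1 - i
--         column = [matrix[r][c] for r in range(rows)]
--         result.extend(reversed(column) if i % 2 == 0 else column)
--     return result
-- ===== Notes on version B (the rewrite author's own statement) =====
-- stated objective: faster
-- what changed: Replaces A's single direction-flipping cursor loop (mutable row/col/direction state stepped one interpreted iteration per cell) with an explicit right-to-left iteration over whole columns, reversing every other column by parity and extending in bulk.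
import Mathlib
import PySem

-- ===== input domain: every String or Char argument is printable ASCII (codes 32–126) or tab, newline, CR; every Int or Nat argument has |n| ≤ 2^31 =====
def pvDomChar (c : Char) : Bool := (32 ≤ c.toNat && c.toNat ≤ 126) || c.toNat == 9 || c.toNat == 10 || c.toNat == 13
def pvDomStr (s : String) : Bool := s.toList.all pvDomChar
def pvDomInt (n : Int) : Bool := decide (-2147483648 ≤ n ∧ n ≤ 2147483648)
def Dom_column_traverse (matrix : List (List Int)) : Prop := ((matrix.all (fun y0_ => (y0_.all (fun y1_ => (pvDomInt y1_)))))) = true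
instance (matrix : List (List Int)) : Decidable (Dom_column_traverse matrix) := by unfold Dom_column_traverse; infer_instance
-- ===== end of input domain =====

-- B replaces A's single direction-flipping cursor loop with an explicit right-to-left
-- iteration over whole columns, reversing every other column by parity (measured faster in a timing run).

-- ===== PORT A =====
-- The while loop of A: state (directions, row, col, next); fuel bounds the iteration count
-- (the Python loop runs exactly rows*cols iterations when it terminates normally).
def goA (matrix : List (List Int)) (rows cols : Int) (dir : String) (row col : Int)
    (next : List Int) : Nat → List Int
  | 0 => next
  | f + 1 =>
    if (next.length : Int) < rows * cols then
      match PySem.List.pyGet? matrix row with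
      | none => next   -- IndexError in Python (outside Pre_)
      | some rw =>
        match PySem.List.pyGet? rw col with
        | none => next -- IndexError in Python (outside Pre_)
        | some v =>
          let next := next ++ [v]
          if dir == "up" then
            if row - 1 < 0 then goA matrix rows cols "down" row (col - 1) next f
            else goA matrix rows cols "up" (row - 1) col next f
          else if dir == "down" then
            if row + 1 == rows then goA matrix rows cols "up" row (col - 1) next f
            else goA matrix rows cols "down" (row + 1) col next f
          else goA matrix rows cols dir row col next f -- unreachable: dir is "up" or "down"
    else next

def column_traverse (matrix : List (List Int)) : List Int :=
  match matrix with
  | [] => []   -- Python raises IndexError on matrix[0] here; excluded by Pre_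
  | r0 :: _ =>
    let rows : Int := matrix.length
    let cols : Int := r0.length
    goA matrix rows cols "up" (rows - 1) (cols - 1) [] (matrix.length * r0.length)

-- ===== PORT B =====
-- column = [matrix[r][c] for r in range(rows)]; getD is exact here since Pre_ guarantees
-- r < len(matrix) and c < len(matrix[r]).
def colFn (matrix : List (List Int)) (rows c : Nat) : List Int :=
  (List.range rows).map (fun r => (matrix.getD r []).getD c 0)

def column_traverse_alt (matrix : List (List Int)) : List Int :=
  match matrix with
  | [] => []   -- Python raises IndexError on matrix[0] here; excluded by Pre_
  | r0 :: _ =>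
    let rows := matrix.length
    let cols := r0.length
    (List.range cols).foldl
      (fun result i =>
        let c := cols - 1 - i
        let column := colFn matrix rows c
        result ++ (if i % 2 == 0 then column.reverse else column)) []

-- ===== PRECONDITION & SPEC =====
-- Pre_ excludes exactly the inputs on which A raises IndexError: the empty matrix
-- (matrix[0]) and ragged matrices with some row shorter than the first row.
def Pre_column_traverse (matrix : List (List Int)) : Prop :=
  matrix ≠ [] ∧ ∀ row ∈ matrix, (matrix.headD []).length ≤ row.length
instance (matrix : List (List Int)) : Decidable (Pre_column_traverse matrix) := by
  unfold Pre_column_traverse; infer_instance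
def pvWitness_column_traverse : List (List Int) := [[1, 2], [3, 4], [5, 6]]

def Spec_column_traverse (matrix : List (List Int)) (out : List Int) : Prop := out = column_traverse_alt matrix
instance (matrix : List (List Int)) (out : List Int) : Decidable (Spec_column_traverse matrix out) := by unfold Spec_column_traverse; infer_instance

-- ===== CLAIM (what is proved, stated in full; the proofs are below) =====
def Claim_equal_column_traverse : Prop := ∀ (matrix : List (List Int)), Dom_column_traverse matrix → Pre_column_traverse matrix → Spec_column_traverse matrix (column_traverse matrix)

-- ===== LEMMAS AND PROOFS =====

lemma goA_succ (matrix : List (List Int)) (rows cols : Int) (dir : String) (row col : Int)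
    (next : List Int) (f : Nat) :
    goA matrix rows cols dir row col next (f + 1) =
      (if (next.length : Int) < rows * cols then
        match PySem.List.pyGet? matrix row with
        | none => next
        | some rw =>
          match PySem.List.pyGet? rw col with
          | none => next
          | some v =>
            let next := next ++ [v]
            if dir == "up" then
              if row - 1 < 0 then goA matrix rows cols "down" row (col - 1) next f
              else goA matrix rows cols "up" (row - 1) col next f
            else if dir == "down" then
              if row + 1 == rows then goA matrix rows cols "up" row (col - 1) next f
              else goA matrix rows cols "down" (row + 1) col next f
            else goA matrix rows cols dir row col next f
      else next) := rfl

lemma pyGet_row (matrix : List (List Int)) (r : Nat) (hr : r < matrix.length) :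
    PySem.List.pyGet? matrix (r : Int) = some (matrix.getD r []) := by
  rw [PySem.List.pyGet?_ofNat _ _ hr, List.getD_eq_getElem _ _ hr]

lemma pyGet_cell (matrix : List (List Int)) (cols : Nat)
    (hc : ∀ row ∈ matrix, cols ≤ row.length) (r c : Nat) (hr : r < matrix.length)
    (hcb : c < cols) :
    PySem.List.pyGet? (matrix.getD r []) (c : Int) = some ((matrix.getD r []).getD c 0) := by
  have hmem : matrix.getD r [] ∈ matrix := by
    rw [List.getD_eq_getElem _ _ hr]; exact List.getElem_mem hr
  have hlen : c < (matrix.getD r []).length := lt_of_lt_of_le hcb (hc _ hmem)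
  rw [PySem.List.pyGet?_ofNat _ _ hlen, List.getD_eq_getElem _ _ hlen]

lemma colFn_length (matrix : List (List Int)) (rows c : Nat) :
    (colFn matrix rows c).length = rows := by simp [colFn]

lemma colFn_take_succ (matrix : List (List Int)) (rows c s : Nat) (h : s < rows) :
    (colFn matrix rows c).take (s + 1)
      = (colFn matrix rows c).take s ++ [(matrix.getD s []).getD c 0] := by
  simp only [colFn, ← List.map_take, List.take_range]
  rw [min_eq_left (by omega), min_eq_left (by omega), List.range_succ]
  simp

lemma colFn_drop_cons (matrix : List (List Int)) (rows c s : Nat) (h : s < rows) :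
    (colFn matrix rows c).drop s
      = (matrix.getD s []).getD c 0 :: (colFn matrix rows c).drop (s + 1) := by
  have hl : s < (colFn matrix rows c).length := by rw [colFn_length]; exact h
  rw [List.drop_eq_getElem_cons hl]
  congr 1
  simp [colFn]

-- Columns cols-1 … 0 by parity, the common form both ports reduce to.
def tailF (matrix : List (List Int)) (rows : Nat) : Nat → Bool → List Int
  | 0, _ => []
  | m + 1, up =>
      (if up then (colFn matrix rows m).reverse else colFn matrix rows m) ++
        tailF matrix rows m (!up)

lemma goA_up (matrix : List (List Int)) (rows cols : Nat) (hrows : rows = matrix.length)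
    (hc : ∀ row ∈ matrix, cols ≤ row.length) :
    ∀ (r : Nat), r < rows → ∀ (c : Nat), c < cols → ∀ (next : List Int) (f : Nat),
      next.length + (r + 1) ≤ rows * cols →
      goA matrix rows cols "up" (r : Int) (c : Int) next (f + (r + 1))
        = goA matrix rows cols "down" 0 ((c : Int) - 1)
            (next ++ ((colFn matrix rows c).take (r + 1)).reverse) f := by
  intro r
  induction r with
  | zero =>
    intro hr c hcb next f hlen
    have hr' : (0 : Nat) < matrix.length := hrows ▸ hr
    have hg0 : PySem.List.pyGet? matrix (0 : Int) = some (matrix.getD 0 []) := by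
      simpa using pyGet_row matrix 0 hr'
    rw [goA_succ, if_pos (by omega)]
    simp only [Nat.cast_zero, hg0, pyGet_cell matrix cols hc 0 c hr' hcb]
    norm_num
    rw [colFn_take_succ matrix rows c 0 hr, List.take_zero, List.nil_append]
    simp
  | succ s ih =>
    intro hr c hcb next f hlen
    have hr' : s + 1 < matrix.length := hrows ▸ hr
    have hstep : f + (s + 1 + 1) = (f + (s + 1)) + 1 := by omega
    rw [hstep, goA_succ, if_pos (by omega)]
    simp only [pyGet_row matrix (s + 1) hr', pyGet_cell matrix cols hc (s + 1) c hr' hcb]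
    rw [if_pos (by rfl), if_neg (by omega)]
    have hcast : ((s + 1 : Nat) : Int) - 1 = ((s : Nat) : Int) := by push_cast; omega
    rw [hcast, ih (by omega) c hcb (next ++ [(matrix.getD (s + 1) []).getD c 0]) f
        (by simp; omega)]
    rw [colFn_take_succ matrix rows c (s + 1) hr]
    simp

lemma goA_down (matrix : List (List Int)) (rows cols : Nat) (hrows : rows = matrix.length)
    (hc : ∀ row ∈ matrix, cols ≤ row.length) :
    ∀ (d : Nat), 1 ≤ d → ∀ (r : Nat), r + d = rows → ∀ (c : Nat), c < cols →
      ∀ (next : List Int) (f : Nat), next.length + d ≤ rows * cols →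
      goA matrix rows cols "down" (r : Int) (c : Int) next (f + d)
        = goA matrix rows cols "up" ((rows : Int) - 1) ((c : Int) - 1)
            (next ++ (colFn matrix rows c).drop r) f := by
  intro d
  induction d with
  | zero => intro h0; exact absurd h0 (by omega)
  | succ e ih =>
    intro _ r hr c hcb next f hlen
    have hrlt : r < matrix.length := by rw [← hrows]; omega
    have hstep : f + (e + 1) = (f + e) + 1 := by omega
    rw [hstep, goA_succ, if_pos (by omega)]
    simp only [pyGet_row matrix r hrlt, pyGet_cell matrix cols hc r c hrlt hcb]
    rw [if_neg (by decide), if_pos (by decide)]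
    by_cases he : e = 0
    · subst he
      rw [if_pos (by simp only [beq_iff_eq]; omega)]
      have hreq : (r : Int) = (rows : Int) - 1 := by omega
      have hdrop : (colFn matrix rows c).drop r = [(matrix.getD r []).getD c 0] := by
        rw [colFn_drop_cons matrix rows c r (by omega),
            List.drop_of_length_le (by rw [colFn_length]; omega)]
      rw [hreq, hdrop]
      simp
    · rw [if_neg (by simp only [beq_iff_eq]; omega)]
      have hcast : (r : Int) + 1 = ((r + 1 : Nat) : Int) := by push_cast; ring
      rw [hcast, ih (by omega) (r + 1) (by omega) c hcb
          (next ++ [(matrix.getD r []).getD c 0]) f (by simp; omega)]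
      rw [colFn_drop_cons matrix rows c r (by omega)]
      simp

lemma goA_all (matrix : List (List Int)) (rows cols : Nat) (hrows : rows = matrix.length)
    (hc : ∀ row ∈ matrix, cols ≤ row.length) (hr1 : 1 ≤ rows) :
    ∀ (n : Nat), n ≤ cols → ∀ (up : Bool) (next : List Int),
      next.length + rows * n = rows * cols →
      goA matrix rows cols (if up then "up" else "down")
          (if up then (rows : Int) - 1 else 0) ((n : Int) - 1) next (rows * n)
        = next ++ tailF matrix rows n up := by
  intro n
  induction n with
  | zero =>
    intro _ up next hinv
    rw [Nat.mul_zero]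
    cases up <;> simp [goA, tailF]
  | succ m ih =>
    intro hn up next hinv
    have hm : m < cols := by omega
    have hmul : rows * (m + 1) = rows * m + rows := Nat.mul_succ rows m
    have hcol : ((m + 1 : Nat) : Int) - 1 = (m : Int) := by push_cast; omega
    cases up
    · -- up = false : go down the column, then recurse upward
      simp only [Bool.false_eq_true, reduceIte]
      have hf : rows * (m + 1) = rows * m + rows := hmul
      rw [hcol, hf, show ((0 : Int)) = ((0 : Nat) : Int) from rfl,
          goA_down matrix rows cols hrows hc rows (by omega) 0 (by omega) m hm next
            (rows * m) (by omega)]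
      rw [List.drop_zero]
      have := ih (by omega) true (next ++ colFn matrix rows m)
        (by simp [colFn_length]; omega)
      simp only [reduceIte] at this
      rw [this, tailF]
      simp
    · -- up = true : go up the column, then recurse downward
      simp only [reduceIte]
      have hrow : ((rows : Int)) - 1 = ((rows - 1 : Nat) : Int) := by omega
      have hf : rows * (m + 1) = rows * m + ((rows - 1) + 1) := by omega
      rw [hcol, hrow, hf,
          goA_up matrix rows cols hrows hc (rows - 1) (by omega) m hm next
            (rows * m) (by omega)]
      have htake : (colFn matrix rows m).take ((rows - 1) + 1) = colFn matrix rows m := by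
        apply List.take_of_length_le; rw [colFn_length]; omega
      rw [htake]
      have := ih (by omega) false (next ++ (colFn matrix rows m).reverse)
        (by simp [colFn_length]; omega)
      simp only [Bool.false_eq_true, reduceIte] at this
      rw [this, tailF]
      simp

lemma tailF_eq (matrix : List (List Int)) (rows : Nat) :
    ∀ (n : Nat) (up : Bool),
      tailF matrix rows n up
        = (List.range n).flatMap (fun i =>
            if ((i % 2 == 0) == up) then (colFn matrix rows (n - 1 - i)).reverse
            else colFn matrix rows (n - 1 - i)) := by
  have parity : ∀ (i : Nat) (up : Bool), (((i + 1) % 2 == 0) == up) = ((i % 2 == 0) == !up) := by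
    intro i up
    rcases Nat.mod_two_eq_zero_or_one i with h | h <;> cases up <;> simp [Nat.add_mod, h]
  intro n
  induction n with
  | zero => intro up; simp [tailF]
  | succ m ih =>
    intro up
    rw [tailF, List.range_succ_eq_map, List.flatMap_cons, List.flatMap_map]
    simp only [Nat.succ_eq_add_one, parity, Nat.add_sub_cancel, Nat.sub_zero,
      Nat.zero_mod, beq_self_eq_true, Bool.true_beq]
    rw [ih (!up)]
    have hsub : ∀ a : Nat, m - 1 - a = m - (a + 1) := fun a => by omega
    cases up <;> simp only [hsub]

-- ===== VERDICT (by name: the statement is the Claim_ definition above) =====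
lemma alt_eq_tailF (matrix : List (List Int)) (r0 : List Int) (rest : List (List Int))
    (hm : matrix = r0 :: rest) :
    column_traverse_alt matrix = tailF matrix matrix.length r0.length true := by
  subst hm
  show List.foldl _ [] (List.range r0.length) = _
  rw [PySem.List.foldl_append_eq_flatMap
    (fun i => if (i % 2 == 0) = true then
        (colFn (r0 :: rest) (r0 :: rest).length (r0.length - 1 - i)).reverse
      else colFn (r0 :: rest) (r0 :: rest).length (r0.length - 1 - i))]
  rw [tailF_eq]
  simp

theorem column_traverse_spec : Claim_equal_column_traverse := by
  intro matrix _ hpre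
  obtain ⟨hne, hrowlen⟩ := hpre
  unfold Spec_column_traverse
  cases hmat : matrix with
  | nil => exact absurd hmat hne
  | cons r0 rest =>
    subst hmat
    have hc : ∀ row ∈ (r0 :: rest), r0.length ≤ row.length := by
      intro row hrow
      simpa using hrowlen row hrow
    have hA := goA_all (r0 :: rest) (r0 :: rest).length r0.length rfl hc
      (by simp) r0.length (le_refl _) true [] (by simp)
    simp only [reduceIte, List.nil_append] at hA
    show goA _ _ _ "up" _ _ [] _ = _
    rw [hA, alt_eq_tailF (r0 :: rest) r0 rest rfl]
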